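-- pv_equiv track=rewrite | github.com/trailofbits/idac | src/idac/ops/families/type_declare.py | _strip_comments_preserve_lines
-- ===== SOURCE A (Python) =====
-- def _strip_comments_preserve_lines(text: str) -> str:
--     out: list[str] = []
--     in_string: str | None = None
--     in_line_comment = False
--     in_block_comment = False
--     i = 0
--     while i < len(text):
--         ch = text[i]
--         nxt = text[i + 1] if i + 1 < len(text) else ""
--         if in_line_comment:
--             if ch == "\n":
--                 out.append(ch)
--                 in_line_comment = False
--             i += 1
--             continue
--         if in_block_comment:
--             if ch == "*" and nxt == "/":
--                 in_block_comment = False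
--                 i += 2
--                 continue
--             if ch == "\n":
--                 out.append(ch)
--             i += 1
--             continue
--         if in_string:
--             out.append(ch)
--             if ch == "\\" and nxt:
--                 out.append(nxt)
--                 i += 2
--                 continue
--             if ch == in_string:
--                 in_string = None
--             i += 1
--             continue
--         if ch == "/" and nxt == "/":
--             in_line_comment = True
--             i += 2
--             continue
--         if ch == "/" and nxt == "*":
--             in_block_comment = True
--             i += 2
--             continue
--         out.append(ch)
--         if ch in {"'", '"'}:
--             in_string = ch
--         i += 1
--     return "".join(out)
-- ===== SOURCE B (Python) =====
-- def _strip_comments_preserve_lines(text: str) -> str: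
--     # Token-at-a-time scanner: jumps over whole comments/strings with find/count
--     # instead of per-character mode flags.
--     out: list[str] = []
--     i = 0
--     n = len(text)
--     while i < n:
--         ch = text[i]
--         if text.startswith('//', i):
--             j = text.find('\n', i + 2)
--             i = n if j == -1 else j  # the newline itself is emitted as ordinary text
--         elif text.startswith('/*', i):
--             j = text.find('*/', i + 2)
--             if j == -1:
--                 out.append('\n' * text.count('\n', i + 2))
--                 i = n
--             else:
--                 out.append('\n' * text.count('\n', i + 2, j))
--                 i = j + 2
--         elif ch == '"' or ch == "'":
--             j = i + 1
--             while j < n: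
--                 if text[j] == '\\' and j + 1 < n:
--                     j += 2
--                 elif text[j] == ch:
--                     j += 1
--                     break
--                 else:
--                     j += 1
--             out.append(text[i:j])
--             i = j
--         else:
--             out.append(ch)
--             i += 1
--     return ''.join(out)
-- ===== Notes on version B (the rewrite author's own statement) =====
-- stated objective: alternative
-- what changed: Replaces A's per-character state machine with mode flags by a token-at-a-time scanner that jumps over whole line comments, block comments and string literals in one step (find/count-style suffix scans), emitting the preserved newlines of a block comment in bulk.
import Mathlib
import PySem

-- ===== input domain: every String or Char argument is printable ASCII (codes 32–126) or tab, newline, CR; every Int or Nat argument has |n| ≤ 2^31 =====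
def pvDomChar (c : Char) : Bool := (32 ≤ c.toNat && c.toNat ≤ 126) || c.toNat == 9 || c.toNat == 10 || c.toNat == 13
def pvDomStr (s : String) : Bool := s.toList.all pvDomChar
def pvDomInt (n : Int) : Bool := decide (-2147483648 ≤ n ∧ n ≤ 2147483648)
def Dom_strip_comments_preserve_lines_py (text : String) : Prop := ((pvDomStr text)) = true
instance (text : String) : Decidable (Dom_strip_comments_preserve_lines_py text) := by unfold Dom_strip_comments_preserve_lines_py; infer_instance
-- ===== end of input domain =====

-- B replaces A's per-character mode-flag loop by a token-at-a-time scanner that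
-- jumps over whole comments and string literals at once (objective: alternative).

-- ===== PORT A =====
-- literal port of A's while-loop: one char per step, state (in_string, in_line_comment, in_block_comment)
def goA : List Char → Option Char → Bool → Bool → List Char
  | [], _, _, _ => []
  | ch :: rest, instr, lc, bc =>
    if lc then
      if ch = '\n' then ch :: goA rest instr false bc
      else goA rest instr lc bc
    else if bc then
      if ch = '*' ∧ rest.head? = some '/' then goA rest.tail instr lc false
      else if ch = '\n' then ch :: goA rest instr lc bc
      else goA rest instr lc bc
    else
      match instr with
      | some q =>
        if ch = '\\' ∧ rest ≠ [] then
          ch :: rest.headI :: goA rest.tail instr lc bc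
        else
          ch :: goA rest (if ch = q then none else instr) lc bc
      | none =>
        if ch = '/' ∧ rest.head? = some '/' then goA rest.tail instr true bc
        else if ch = '/' ∧ rest.head? = some '*' then goA rest.tail instr lc true
        else ch :: goA rest (if ch = '"' ∨ ch = '\'' then some ch else instr) lc bc
termination_by l _ _ _ => l.length
decreasing_by all_goals simp <;> omega

def strip_comments_preserve_lines_py (text : String) : String :=
  String.mk (goA text.toList none false false)

-- ===== PORT B =====
-- skipLineB: B's `text.find('\n', i)` — drop the line-comment body, keep from the newline on
def skipLineB : List Char → List Char
  | [] => []
  | c :: r => if c = '\n' then c :: r else skipLineB r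

-- blockScanB: B's `find('*/')` + `count('\n', ..)` in one suffix scan — (newline count, rest after */)
def blockScanB : List Char → Nat × List Char
  | [] => (0, [])
  | c :: r =>
    if c = '*' ∧ r.head? = some '/' then (0, r.tail)
    else ((if c = '\n' then (blockScanB r).1 + 1 else (blockScanB r).1), (blockScanB r).2)
termination_by l => l.length
decreasing_by all_goals simp <;> omega

-- strScanB: B's inner `while` locating the end of a string literal — (body incl. closing quote, rest)
def strScanB (q : Char) : List Char → List Char × List Char
  | [] => ([], [])
  | c :: r =>
    if c = '\\' ∧ r ≠ [] then
      (c :: r.headI :: (strScanB q r.tail).1, (strScanB q r.tail).2)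
    else if c = q then ([c], r)
    else (c :: (strScanB q r).1, (strScanB q r).2)
termination_by l => l.length
decreasing_by all_goals simp <;> omega

theorem skipLineB_le (l : List Char) : (skipLineB l).length ≤ l.length := by
  induction l with
  | nil => simp [skipLineB]
  | cons c r ih => simp only [skipLineB]; split <;> simp <;> omega

theorem blockScanB_le (l : List Char) : (blockScanB l).2.length ≤ l.length := by
  induction l with
  | nil => simp [blockScanB]
  | cons c r ih =>
    simp only [blockScanB]; split
    · simp [List.length_tail]; omega
    · simp; omega

theorem strScanB_le_aux (q : Char) : ∀ n (l : List Char), l.length ≤ n → (strScanB q l).2.length ≤ l.length := by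
  intro n
  induction n with
  | zero =>
    intro l hl
    have : l = [] := List.eq_nil_of_length_eq_zero (Nat.le_zero.mp hl)
    subst this; simp [strScanB]
  | succ n ih =>
    intro l hl
    match l with
    | [] => simp [strScanB]
    | c :: r =>
      have hr : r.length ≤ n := by simp at hl; omega
      have ht : r.tail.length = r.length - 1 := List.length_tail
      have hrt : r.tail.length ≤ n := by omega
      simp only [strScanB]
      split
      · have := ih r.tail hrt; simp; omega
      · split
        · simp
        · have := ih r hr; simp; omega

theorem strScanB_le (q : Char) (l : List Char) : (strScanB q l).2.length ≤ l.length :=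
  strScanB_le_aux q l.length l le_rfl

def goB : List Char → List Char
  | [] => []
  | c :: r =>
    if c = '/' ∧ r.head? = some '/' then goB (skipLineB r.tail)
    else if c = '/' ∧ r.head? = some '*' then
      List.replicate (blockScanB r.tail).1 '\n' ++ goB (blockScanB r.tail).2
    else if c = '"' ∨ c = '\'' then
      c :: (strScanB c r).1 ++ goB (strScanB c r).2
    else c :: goB r
termination_by l => l.length
decreasing_by
  · have h1 := skipLineB_le r.tail; have h2 : r.tail.length = r.length - 1 := List.length_tail; simp; omega
  · have h1 := blockScanB_le r.tail; have h2 : r.tail.length = r.length - 1 := List.length_tail; simp; omega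
  · have h1 := strScanB_le c r; simp; omega
  · simp

def strip_comments_preserve_lines_py_alt (text : String) : String :=
  String.mk (goB text.toList)

-- ===== PRECONDITION & SPEC =====
def Spec_strip_comments_preserve_lines_py (text : String) (out : String) : Prop := out = strip_comments_preserve_lines_py_alt text
instance (text : String) (out : String) : Decidable (Spec_strip_comments_preserve_lines_py text out) := by unfold Spec_strip_comments_preserve_lines_py; infer_instance

-- ===== CLAIM (what is proved, stated in full; the proofs are below) =====
def Claim_equal_strip_comments_preserve_lines_py : Prop := ∀ (text : String), Dom_strip_comments_preserve_lines_py text → Spec_strip_comments_preserve_lines_py text (strip_comments_preserve_lines_py text)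

-- ===== LEMMAS AND PROOFS =====

-- the four mode invariants: A in line-comment / block-comment / string / code mode
-- equals B's token scanner applied at the corresponding resumption point
theorem mainLemma : ∀ n (l : List Char), l.length ≤ n →
    (goA l none true false = goB (skipLineB l)) ∧
    (goA l none false true =
      List.replicate (blockScanB l).1 '\n' ++ goB (blockScanB l).2) ∧
    (∀ q, goA l (some q) false false = (strScanB q l).1 ++ goB (strScanB q l).2) ∧
    (goA l none false false = goB l) := by
  intro n
  induction n with
  | zero =>
    intro l hl
    have : l = [] := List.eq_nil_of_length_eq_zero (Nat.le_zero.mp hl)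
    subst this
    simp [goA, goB, skipLineB, blockScanB, strScanB]
  | succ n ih =>
    intro l hl
    match l with
    | [] => simp [goA, goB, skipLineB, blockScanB, strScanB]
    | c :: r =>
      have hr : r.length ≤ n := by simp at hl; omega
      have hrt : r.tail.length ≤ n := by have : r.tail.length = r.length - 1 := List.length_tail; omega
      obtain ⟨ih1, ih2, ih3, ih4⟩ := ih r hr
      obtain ⟨it1, it2, it3, it4⟩ := ih r.tail hrt
      refine ⟨?_, ?_, ?_, ?_⟩
      · -- line comment
        by_cases h : c = '\n'
        · subst h; simp [goA, skipLineB, goB, ih4]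
        · simp [goA, skipLineB, h, ih1]
      · -- block comment
        by_cases h : c = '*' ∧ r.head? = some '/'
        · simp [goA, blockScanB, h, it4]
        · by_cases h2 : c = '\n'
          · subst h2
            simp [goA, blockScanB, h, ih2, List.replicate_succ]
          · simp [goA, blockScanB, h, h2, ih2]
      · -- string literal
        intro q
        by_cases h : c = '\\' ∧ r ≠ []
        · simp [goA, strScanB, h, it3 q]
        · by_cases h2 : c = q
          · subst h2; simp [goA, strScanB, h, ih4]
          · simp [goA, strScanB, h, h2, ih3 q]
      · -- normal code
        by_cases h : c = '/' ∧ r.head? = some '/'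
        · simp [goA, goB, h, it1]
        · by_cases h2 : c = '/' ∧ r.head? = some '*'
          · simp [goA, goB, h, h2, it2]
          · by_cases h3 : c = '"' ∨ c = '\''
            · simp [goA, goB, h, h2, h3, ih3 c]
            · simp [goA, goB, h, h2, h3, ih4]

-- ===== VERDICT (by name: the statement is the Claim_ definition above) =====
theorem strip_comments_preserve_lines_py_spec : Claim_equal_strip_comments_preserve_lines_py := by
  intro text _
  unfold Spec_strip_comments_preserve_lines_py strip_comments_preserve_lines_py strip_comments_preserve_lines_py_alt
  exact congrArg String.mk (mainLemma text.toList.length text.toList le_rfl).2.2.2
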